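-- pv_equiv track=rewrite | github.com/Synthavo/yolov7 | src/yolov7/helper/model_eval_help.py | _get_classes_not_detected_in_n_consecutive
-- ===== SOURCE A (Python) =====
-- def _get_classes_not_detected_in_n_consecutive(data, n):
--     classes_not_detected_in_n_consecutive = set()
--     consecutive_misses = {}
--
--     for img in data:
--         for class_data in data[img]:
--             for class_name, class_info in class_data.items():
--                 if not class_info.get('detection'):
--                     consecutive_misses.setdefault(class_name, 0)
--                     consecutive_misses[class_name] += 1
--                 else:
--                     consecutive_misses[class_name] = 0
--
--                 if consecutive_misses[class_name] >= n:
--                     classes_not_detected_in_n_consecutive.add(class_name)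
--
--     return classes_not_detected_in_n_consecutive
-- ===== SOURCE B (Python) =====
-- def _get_classes_not_detected_in_n_consecutive(data, n):
--     # Phase 1: flatten to one global stream of (class_name, detected) items.
--     items = []
--     for img in data:
--         for class_data in data[img]:
--             for class_name, class_info in class_data.items():
--                 items.append((class_name, bool(class_info.get('detection'))))
--
--     # Phase 2: group each class's occurrences (with global positions).
--     occ = {}
--     for pos, (class_name, detected) in enumerate(items):
--         occ.setdefault(class_name, []).append((pos, detected))
--
--     # Position at which a class first accumulates n consecutive misses
--     # (for n <= 0 this is its first occurrence), or None if it never does.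
--     def crossing(entries):
--         run = 0
--         for pos, detected in entries:
--             run = 0 if detected else run + 1
--             if run >= n:
--                 return pos
--         return None
--
--     return {c for c, entries in occ.items() if crossing(entries) is not None}
-- ===== Notes on version B (the rewrite author's own statement) =====
-- stated objective: alternative
-- what changed: A streams items once, maintaining a per-class consecutive-miss counter and adding a class to the result the moment its counter reaches n; B first flattens the frames into one item stream, groups each class's (position, detected) occurrences into a dict, then computes per class the position where it first accumulates n consecutive misses and returns the classes that have such a position.
import Mathlib
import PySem

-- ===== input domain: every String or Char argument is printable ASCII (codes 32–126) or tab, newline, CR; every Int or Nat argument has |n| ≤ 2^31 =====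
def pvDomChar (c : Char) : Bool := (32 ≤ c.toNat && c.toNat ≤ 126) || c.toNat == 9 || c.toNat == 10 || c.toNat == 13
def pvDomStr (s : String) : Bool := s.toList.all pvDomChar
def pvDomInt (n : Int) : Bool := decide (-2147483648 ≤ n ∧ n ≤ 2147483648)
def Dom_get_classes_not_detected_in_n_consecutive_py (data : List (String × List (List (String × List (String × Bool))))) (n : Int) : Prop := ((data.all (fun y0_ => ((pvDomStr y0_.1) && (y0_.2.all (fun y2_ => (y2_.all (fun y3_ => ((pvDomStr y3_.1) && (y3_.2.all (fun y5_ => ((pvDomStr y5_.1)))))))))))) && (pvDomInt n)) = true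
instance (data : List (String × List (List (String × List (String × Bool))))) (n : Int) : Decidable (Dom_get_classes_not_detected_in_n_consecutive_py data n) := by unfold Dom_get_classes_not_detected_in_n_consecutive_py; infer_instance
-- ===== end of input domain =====

-- B replaces A's streaming per-class miss counter with a two-phase grouping: flatten the
-- frames to one item stream, group each class's (position, detected) occurrences, and keep
-- the classes that first reach n consecutive misses at some position (alternative, not faster).
-- Both programs return a Python set, whose iteration order is not modelled; both ports list
-- its elements in the order classes first reach n consecutive misses.

-- ===== PORT A =====
-- truthiness of class_info.get('detection') (None and False are falsy)
def pvDetected (info : List (String × Bool)) : Bool :=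
  ((PySem.Dict.mk info).get? "detection").getD false

-- body of A's innermost loop: update the class's consecutive-miss counter, add on ≥ n
def pvStepA (n : Int) (st : PySem.Set String × PySem.Dict String Int)
    (ci : String × List (String × Bool)) : PySem.Set String × PySem.Dict String Int :=
  let m' : Int := if pvDetected ci.2 then 0 else st.2.getD ci.1 0 + 1
  (if n ≤ m' then PySem.Set.add st.1 ci.1 else st.1, st.2.insert ci.1 m')

def get_classes_not_detected_in_n_consecutive_py (data : List (String × List (List (String × List (String × Bool))))) (n : Int) : List String :=
  (data.foldl (fun st img =>
      img.2.foldl (fun st class_data => class_data.foldl (pvStepA n) st) st)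
    (PySem.Set.empty, PySem.Dict.empty)).1

-- ===== PORT B =====
-- Source B's crossing(entries): position where the run of misses first reaches n, else None
def pvCrossing (n : Int) (run : Int) : List (Int × Bool) → Option Int
  | [] => none
  | e :: rest =>
    let run' : Int := if e.2 then 0 else run + 1
    if n ≤ run' then some e.1 else pvCrossing n run' rest

-- Source B builds items, groups them into occ, and returns the SET {c ∈ occ | crossing(occ[c]) ≠ none}.
-- A Python set's iteration order is not modelled (PYSEM): this port lists that set's elements
-- ordered by their crossing position — a class appears exactly at its own crossing position —
-- so that set equality with A's port can be stated as list equality.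
def get_classes_not_detected_in_n_consecutive_py_alt (data : List (String × List (List (String × List (String × Bool))))) (n : Int) : List String :=
  let items : List (String × Bool) :=
    data.flatMap (fun img => img.2.flatMap (fun cd => cd.map (fun ci => (ci.1, pvDetected ci.2))))
  let occ : PySem.Dict String (List (Int × Bool)) :=
    (PySem.List.enumerate items).foldl
      (fun d pe => d.insert pe.2.1 (d.getD pe.2.1 [] ++ [(pe.1, pe.2.2)]))
      PySem.Dict.empty
  (PySem.List.enumerate items).filterMap (fun pe =>
    if pvCrossing n 0 (occ.getD pe.2.1 []) = some pe.1 then some pe.2.1 else none)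

-- ===== PRECONDITION & SPEC =====
def Spec_get_classes_not_detected_in_n_consecutive_py (data : List (String × List (List (String × List (String × Bool))))) (n : Int) (out : List String) : Prop := out = get_classes_not_detected_in_n_consecutive_py_alt data n
instance (data : List (String × List (List (String × List (String × Bool))))) (n : Int) (out : List String) : Decidable (Spec_get_classes_not_detected_in_n_consecutive_py data n out) := by unfold Spec_get_classes_not_detected_in_n_consecutive_py; infer_instance

-- ===== CLAIM (what is proved, stated in full; the proofs are below) =====
def Claim_equal_get_classes_not_detected_in_n_consecutive_py : Prop := ∀ (data : List (String × List (List (String × List (String × Bool))))) (n : Int), Dom_get_classes_not_detected_in_n_consecutive_py data n → Spec_get_classes_not_detected_in_n_consecutive_py data n (get_classes_not_detected_in_n_consecutive_py data n)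

-- ===== LEMMAS AND PROOFS =====

-- A's step, re-expressed on a pre-truthified item (class name, detected flag)
def pvStepI (n : Int) (st : List String × PySem.Dict String Int)
    (it : String × Bool) : List String × PySem.Dict String Int :=
  let m' : Int := if it.2 then 0 else st.2.getD it.1 0 + 1
  (if n ≤ m' then PySem.Set.add st.1 it.1 else st.1, st.2.insert it.1 m')

-- the occurrences of class c in the item stream L, with their global positions
def pvOcc (L : List (String × Bool)) (c : String) : List (Int × Bool) :=
  (PySem.List.enumerate L).filterMap
    (fun pe => if pe.2.1 = c then some (pe.1, pe.2.2) else none)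

-- final value of the miss counter after scanning entries starting from run r
def pvRunAfter (r : Int) (E : List (Int × Bool)) : Int :=
  E.foldl (fun r e => if e.2 then 0 else r + 1) r

lemma pvOcc_append (L : List (String × Bool)) (x : String × Bool) (c : String) :
    pvOcc (L ++ [x]) c
      = pvOcc L c ++ (if x.1 = c then [((L.length : Int), x.2)] else []) := by
  simp only [pvOcc, PySem.List.enumerate_append, List.filterMap_append]
  congr 1
  by_cases h : x.1 = c <;>
    simp [PySem.List.enumerate_cons, PySem.List.enumerate_nil, h]

lemma pvRunAfter_append (r : Int) (E : List (Int × Bool)) (e : Int × Bool) :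
    pvRunAfter r (E ++ [e]) = if e.2 then 0 else pvRunAfter r E + 1 := by
  simp [pvRunAfter, List.foldl_append]

lemma pvCrossing_append (n r : Int) (E : List (Int × Bool)) (e : Int × Bool) :
    pvCrossing n r (E ++ [e])
      = match pvCrossing n r E with
        | some p => some p
        | none =>
            if n ≤ (if e.2 then 0 else pvRunAfter r E + 1) then some e.1 else none := by
  induction E generalizing r with
  | nil => simp [pvCrossing, pvRunAfter]
  | cons a E ih =>
      have hrun : pvRunAfter r (a :: E) = pvRunAfter (if a.2 then 0 else r + 1) E := by
        simp [pvRunAfter]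
      simp only [List.cons_append, pvCrossing, hrun]
      by_cases hn : n ≤ (if a.2 then (0 : Int) else r + 1)
      · simp [hn]
      · simp only [if_neg hn]
        exact ih _

lemma pvCrossing_mem (n r : Int) (E : List (Int × Bool)) (p : Int)
    (h : pvCrossing n r E = some p) : ∃ f, (p, f) ∈ E := by
  induction E generalizing r with
  | nil => simp [pvCrossing] at h
  | cons a E ih =>
      simp only [pvCrossing] at h
      by_cases hn : n ≤ (if a.2 then (0 : Int) else r + 1)
      · rw [if_pos hn] at h
        injection h with h
        refine ⟨a.2, ?_⟩
        rw [← h, Prod.mk.eta]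
        simp
      · rw [if_neg hn] at h
        obtain ⟨f, hf⟩ := ih _ h
        exact ⟨f, by simp [hf]⟩

lemma pvOcc_pos_lt (L : List (String × Bool)) (c : String) (p : Int) (f : Bool)
    (h : (p, f) ∈ pvOcc L c) : 0 ≤ p ∧ p < L.length := by
  simp only [pvOcc, List.mem_filterMap] at h
  obtain ⟨pe, hpe, hcond⟩ := h
  split at hcond
  · rw [PySem.List.mem_enumerate_iff] at hpe
    obtain ⟨k, hk, rfl⟩ := hpe
    simp at hcond
    obtain ⟨h1, -⟩ := hcond
    omega
  · simp at hcond

-- the dict-grouping loop of Source B computes pvOcc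
lemma pvOcc_fold (ps : List (Int × (String × Bool))) (d : PySem.Dict String (List (Int × Bool)))
    (c : String) :
    (ps.foldl (fun d pe => d.insert pe.2.1 (d.getD pe.2.1 [] ++ [(pe.1, pe.2.2)])) d).getD c []
      = d.getD c [] ++ ps.filterMap (fun pe => if pe.2.1 = c then some (pe.1, pe.2.2) else none) := by
  induction ps generalizing d with
  | nil => simp
  | cons a ps ih =>
      simp only [List.foldl_cons, List.filterMap_cons, ih]
      by_cases hc : a.2.1 = c
      · subst hc
        rw [PySem.Dict.getD_insert_self]
        simp
      · rw [PySem.Dict.getD_insert_of_ne _ _ _ (Ne.symm hc)]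
        simp [hc]

-- main invariant of A's fold over the item stream
lemma pvMain (n : Int) (L : List (String × Bool)) :
    (∀ c, (L.foldl (pvStepI n) (PySem.Set.empty, PySem.Dict.empty)).2.getD c 0
            = pvRunAfter 0 (pvOcc L c)) ∧
    (L.foldl (pvStepI n) (PySem.Set.empty, PySem.Dict.empty)).1
      = (PySem.List.enumerate L).filterMap
          (fun pe => if pvCrossing n 0 (pvOcc L pe.2.1) = some pe.1 then some pe.2.1 else none) := by
  induction L using List.reverseRecOn with
  | nil => exact ⟨fun c => rfl, rfl⟩
  | append_singleton L x ih =>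
    obtain ⟨ihm, ihr⟩ := ih
    set st := L.foldl (pvStepI n) (PySem.Set.empty, PySem.Dict.empty) with hst
    have hfold : ((L ++ [x]).foldl (pvStepI n) (PySem.Set.empty, PySem.Dict.empty))
        = pvStepI n st x := by
      rw [List.foldl_append]
      rfl
    have hm : (if x.2 then (0 : Int) else st.2.getD x.1 0 + 1)
        = pvRunAfter 0 (pvOcc (L ++ [x]) x.1) := by
      rw [pvOcc_append, if_pos rfl, pvRunAfter_append, ihm]
    have hmem : ∀ c, c ∈ st.1 ↔ pvCrossing n 0 (pvOcc L c) ≠ none := by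
      intro c
      rw [ihr]
      constructor
      · intro hc
        rw [List.mem_filterMap] at hc
        obtain ⟨pe, hpe, hcond⟩ := hc
        by_cases hcr : pvCrossing n 0 (pvOcc L pe.2.1) = some pe.1
        · rw [if_pos hcr] at hcond
          injection hcond with hcond
          rw [← hcond]
          simp [hcr]
        · rw [if_neg hcr] at hcond; cases hcond
      · intro hc
        obtain ⟨p, hp⟩ := Option.ne_none_iff_exists'.mp hc
        obtain ⟨f, hf⟩ := pvCrossing_mem n 0 _ p hp
        rw [pvOcc, List.mem_filterMap] at hf
        obtain ⟨pe, hpe, hcond⟩ := hf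
        by_cases hcc : pe.2.1 = c
        · rw [if_pos hcc] at hcond
          injection hcond with hcond
          have h1 : pe.1 = p := congrArg Prod.fst hcond
          rw [List.mem_filterMap]
          exact ⟨pe, hpe, by rw [hcc, h1, if_pos hp]⟩
        · rw [if_neg hcc] at hcond; cases hcond
    refine ⟨?_, ?_⟩
    · intro c
      rw [hfold]
      simp only [pvStepI]
      by_cases hc : c = x.1
      · subst hc
        rw [PySem.Dict.getD_insert_self]
        exact hm
      · rw [PySem.Dict.getD_insert_of_ne _ _ _ hc, ihm, pvOcc_append,
            if_neg (Ne.symm hc), List.append_nil]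
    · rw [hfold]
      have henum : PySem.List.enumerate (L ++ [x])
          = PySem.List.enumerate L ++ [((L.length : Int), x)] := by
        rw [PySem.List.enumerate_append, PySem.List.enumerate_cons, PySem.List.enumerate_nil]
        norm_num
      rw [henum, List.filterMap_append]
      have hpref : (PySem.List.enumerate L).filterMap
            (fun pe => if pvCrossing n 0 (pvOcc (L ++ [x]) pe.2.1) = some pe.1 then some pe.2.1 else none)
          = st.1 := by
        rw [ihr]
        apply List.filterMap_congr
        intro pe hpe
        have hlt : pe.1 < (L.length : Int) := by
          rw [PySem.List.mem_enumerate_iff] at hpe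
          obtain ⟨k, hk, rfl⟩ := hpe
          simp
          exact_mod_cast hk
        have hiff : (pvCrossing n 0 (pvOcc (L ++ [x]) pe.2.1) = some pe.1)
            ↔ (pvCrossing n 0 (pvOcc L pe.2.1) = some pe.1) := by
          by_cases hcx : pe.2.1 = x.1
          · rw [hcx, pvOcc_append, if_pos rfl, pvCrossing_append]
            cases hcr : pvCrossing n 0 (pvOcc L x.1) with
            | some p => exact Iff.rfl
            | none =>
                show (if n ≤ (if x.2 = true then (0 : Int) else pvRunAfter 0 (pvOcc L x.1) + 1)
                      then some ((L.length : Int)) else none) = some pe.1 ↔ none = some pe.1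
                by_cases hnn : n ≤ (if x.2 = true then (0 : Int) else pvRunAfter 0 (pvOcc L x.1) + 1)
                · rw [if_pos hnn]
                  constructor
                  · intro hcon; injection hcon with hcon; omega
                  · intro hcon; cases hcon
                · rw [if_neg hnn]
          · rw [pvOcc_append, if_neg (Ne.symm hcx), List.append_nil]
        simp only [hiff]
      rw [hpref]
      simp only [pvStepI, List.filterMap_cons, List.filterMap_nil]
      cases hcr : pvCrossing n 0 (pvOcc L x.1) with
      | some p =>
          have hxin : x.1 ∈ st.1 := (hmem x.1).mpr (by simp [hcr])
          have hplt : p < (L.length : Int) := by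
            obtain ⟨f, hf⟩ := pvCrossing_mem n 0 _ p hcr
            exact (pvOcc_pos_lt L x.1 p f hf).2
          have hcond : ¬ pvCrossing n 0 (pvOcc (L ++ [x]) x.1) = some ((L.length : Int)) := by
            rw [pvOcc_append, if_pos rfl, pvCrossing_append, hcr]
            intro hcon; injection hcon with hcon; omega
          rw [if_neg hcond, PySem.Set.add_of_mem hxin]
          simp
      | none =>
          have hxout : x.1 ∉ st.1 := fun hx => ((hmem x.1).mp hx) hcr
          have heq : pvCrossing n 0 (pvOcc (L ++ [x]) x.1)
              = if n ≤ (if x.2 then (0 : Int) else st.2.getD x.1 0 + 1)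
                then some ((L.length : Int)) else none := by
            rw [pvOcc_append, if_pos rfl, pvCrossing_append, hcr, ihm]
          by_cases hn : n ≤ (if x.2 then (0 : Int) else st.2.getD x.1 0 + 1)
          · rw [heq, PySem.Set.add_of_not_mem hxout]
            simp [hn]
          · rw [heq]
            simp [hn]

-- A's triple loop is the fold of pvStepI over the flattened item stream
lemma pvA_eq_fold (data : List (String × List (List (String × List (String × Bool))))) (n : Int) :
    get_classes_not_detected_in_n_consecutive_py data n
      = ((data.flatMap (fun img => img.2.flatMap (fun cd => cd.map (fun ci => (ci.1, pvDetected ci.2))))).foldl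
          (pvStepI n) (PySem.Set.empty, PySem.Dict.empty)).1 := by
  unfold get_classes_not_detected_in_n_consecutive_py
  rw [List.foldl_flatMap]
  congr 1
  apply List.foldl_ext
  intro st img _
  rw [List.foldl_flatMap]
  apply List.foldl_ext
  intro st cd _
  rw [List.foldl_map]
  apply List.foldl_ext
  intro st ci _
  rfl

-- ===== VERDICT (by name: the statement is the Claim_ definition above) =====
theorem get_classes_not_detected_in_n_consecutive_py_spec : Claim_equal_get_classes_not_detected_in_n_consecutive_py := by
  intro data n _
  unfold Spec_get_classes_not_detected_in_n_consecutive_py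
  unfold get_classes_not_detected_in_n_consecutive_py_alt
  rw [pvA_eq_fold, (pvMain n _).2]
  apply List.filterMap_congr
  intro pe _
  rw [pvOcc_fold]
  simp [pvOcc]
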